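-- pv_equiv track=rewrite | github.com/winstoncheong/adventofcode | 2015/day11.py | has_two_pairs
-- ===== SOURCE A (Python) =====
-- def has_two_pairs(pw):
--     pairs = 0
--     i = 0
--     while i < len(pw):
--         if len(pw) > i + 1 and pw[i]==pw[i+1]:
--             pairs += 1
--             i += 2
--         else:
--             i += 1
--     return pairs >= 2
-- ===== SOURCE B (Python) =====
-- import re
--
-- def has_two_pairs(pw):
--     # re.findall consumes each 2-char match and resumes after it, which is
--     # exactly the greedy non-overlapping pairing of the skip-by-2 loop.
--     return len(re.findall(r'(.)\1', pw, re.DOTALL)) >= 2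
-- ===== Notes on version B (the rewrite author's own statement) =====
-- stated objective: idiomatic
-- what changed: Replaces the hand-written index loop (skip-by-2 on a pair, counter, threshold test) with a one-line regex: re.findall(r'(.)\1', pw, re.DOTALL) enumerates exactly the greedy non-overlapping adjacent pairs, and len(...) >= 2 gives the same bool; the scan runs in the C regex engine instead of the Python interpreter.
import Mathlib
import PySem

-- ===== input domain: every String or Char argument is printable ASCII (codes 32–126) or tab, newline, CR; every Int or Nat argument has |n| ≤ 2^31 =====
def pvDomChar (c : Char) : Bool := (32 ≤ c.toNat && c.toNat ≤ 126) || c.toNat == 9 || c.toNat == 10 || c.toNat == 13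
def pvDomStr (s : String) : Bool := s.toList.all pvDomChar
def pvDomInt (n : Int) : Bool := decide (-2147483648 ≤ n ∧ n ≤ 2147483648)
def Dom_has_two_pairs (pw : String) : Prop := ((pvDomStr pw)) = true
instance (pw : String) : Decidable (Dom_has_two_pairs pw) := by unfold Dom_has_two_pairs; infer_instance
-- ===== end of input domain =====

-- B replaces A's index/counter while-loop by a one-line regex findall; same behaviour, more idiomatic.

-- ===== PORT A =====
-- A's while loop over indices: pairs counter, i skips by 2 after a matched pair, else by 1.
def hasTwoPairsLoop (cs : List Char) (i : Nat) (pairs : Int) : Int :=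
  if i < cs.length then
    if i + 1 < cs.length ∧ cs.getD i ' ' = cs.getD (i+1) ' ' then
      hasTwoPairsLoop cs (i+2) (pairs+1)
    else
      hasTwoPairsLoop cs (i+1) pairs
  else pairs
termination_by cs.length - i

def has_two_pairs (pw : String) : Bool :=
  hasTwoPairsLoop pw.toList 0 0 ≥ 2

-- ===== PORT B =====
-- Hand port of re.findall(r'(.)\1', pw, re.DOTALL): the regex engine scans left to right,
-- at each position matches two equal adjacent characters greedily and resumes AFTER the
-- consumed match (exact for this pattern: no backtracking across matches is possible).
def reFindallPairPairs : List Char → List Char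
  | a :: b :: rest => if a == b then a :: reFindallPairPairs rest else reFindallPairPairs (b :: rest)
  | _ => []

def has_two_pairs_alt (pw : String) : Bool :=
  (reFindallPairPairs pw.toList).length ≥ 2

-- ===== PRECONDITION & SPEC =====
def Spec_has_two_pairs (pw : String) (out : Bool) : Prop := out = has_two_pairs_alt pw
instance (pw : String) (out : Bool) : Decidable (Spec_has_two_pairs pw out) := by unfold Spec_has_two_pairs; infer_instance

-- ===== CLAIM (what is proved, stated in full; the proofs are below) =====
def Claim_equal_has_two_pairs : Prop := ∀ (pw : String), Dom_has_two_pairs pw → Spec_has_two_pairs pw (has_two_pairs pw)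

-- ===== LEMMAS AND PROOFS =====

-- Loop invariant: the loop from index i counts pairs of the dropped suffix.
theorem loop_eq_findall (n : Nat) : ∀ (cs : List Char) (i : Nat) (p : Int),
    cs.length - i ≤ n →
    hasTwoPairsLoop cs i p = p + (reFindallPairPairs (cs.drop i)).length := by
  induction n with
  | zero =>
    intro cs i p h
    have hle : cs.length ≤ i := by omega
    rw [hasTwoPairsLoop]
    simp [Nat.not_lt.mpr hle, List.drop_eq_nil_of_le hle, reFindallPairPairs]
  | succ n ih =>
    intro cs i p h
    rw [hasTwoPairsLoop]
    by_cases hi : i < cs.length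
    · simp only [if_pos hi]
      have hdrop : cs.drop i = cs[i] :: cs.drop (i+1) := List.drop_eq_getElem_cons hi
      by_cases hi1 : i + 1 < cs.length
      · have hdrop1 : cs.drop (i+1) = cs[i+1] :: cs.drop (i+2) := List.drop_eq_getElem_cons hi1
        have hgi : cs.getD i ' ' = cs[i] := List.getD_eq_getElem cs ' ' hi
        have hgi1 : cs.getD (i+1) ' ' = cs[i+1] := List.getD_eq_getElem cs ' ' hi1
        by_cases heq : cs[i] = cs[i+1]
        · rw [if_pos ⟨hi1, by rw [hgi, hgi1, heq]⟩, ih cs (i+2) (p+1) (by omega),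
            hdrop, hdrop1, reFindallPairPairs]
          simp [heq]
          omega
        · rw [if_neg (by rw [hgi, hgi1]; tauto), ih cs (i+1) p (by omega),
            hdrop, hdrop1, reFindallPairPairs]
          simp [heq]
      · have hnil : cs.drop (i+1) = [] := List.drop_eq_nil_of_le (by omega)
        rw [if_neg (by tauto), ih cs (i+1) p (by omega), hdrop, hnil]
        rfl
    · simp only [if_neg hi]
      have hle : cs.length ≤ i := Nat.not_lt.mp hi
      simp [List.drop_eq_nil_of_le hle, reFindallPairPairs]

-- ===== VERDICT (by name: the statement is the Claim_ definition above) =====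
theorem has_two_pairs_spec : Claim_equal_has_two_pairs := by
  intro pw _
  unfold Spec_has_two_pairs has_two_pairs has_two_pairs_alt
  rw [loop_eq_findall (pw.toList.length) pw.toList 0 0 (by omega)]
  simp
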